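-- pv_equiv track=rewrite | github.com/SpiceWeasel2718/AoC | 2022/AoC2022_day06.py | part1
-- ===== SOURCE A (Python) =====
-- def part1(input_text):
--     from collections import deque
--
--     stream = input_text[:-1]
--     last4 = deque(maxlen=4)
--
--     for n, c in enumerate(stream, 1):
--         last4.append(c)
--
--         if len(set(last4)) == 4:
--             return n
-- ===== SOURCE B (Python) =====
-- def part1(input_text):
--     stream = input_text[:-1]
--     last_seen = {}
--     start = 0
--     for i, c in enumerate(stream):
--         j = last_seen.get(c)
--         if j is not None and j >= start:
--             start = j + 1
--         last_seen[c] = i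
--         if i - start + 1 == 4:
--             return i + 1
-- ===== Notes on version B (the rewrite author's own statement) =====
-- stated objective: alternative
-- what changed: Replaced the deque-of-4 plus per-step set() recomputation by a single sliding-window pass that maintains a last-seen-index dict and a left pointer, returning when the distinct window first reaches length 4.
import Mathlib
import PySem

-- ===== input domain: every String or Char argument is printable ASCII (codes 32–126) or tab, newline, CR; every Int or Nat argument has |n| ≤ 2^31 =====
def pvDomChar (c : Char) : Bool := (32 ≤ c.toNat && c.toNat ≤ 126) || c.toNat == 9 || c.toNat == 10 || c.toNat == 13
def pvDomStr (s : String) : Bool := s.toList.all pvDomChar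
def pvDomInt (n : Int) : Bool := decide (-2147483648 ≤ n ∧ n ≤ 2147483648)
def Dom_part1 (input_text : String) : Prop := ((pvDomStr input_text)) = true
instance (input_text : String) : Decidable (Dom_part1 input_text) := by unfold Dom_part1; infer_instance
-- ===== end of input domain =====

-- B replaces A's deque-of-4 with per-step set() recomputation by a single sliding-window
-- scan maintaining a last-seen-index dict and a left pointer; same return value everywhere.


-- ===== PORT A =====
-- loop of A: for n, c in enumerate(stream, 1): last4.append(c) (deque maxlen=4 drops the
-- leftmost element when exceeding 4); if len(set(last4)) == 4: return n
def part1Go : List Char → Int → List Char → Option Int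
  | [], _, _ => none
  | c :: rest, n, last4 =>
    let d0 := last4 ++ [c]
    let d := if 4 < d0.length then d0.tail else d0
    if (PySem.Set.ofList d).length = 4 then some n
    else part1Go rest (n + 1) d

def part1 (input_text : String) : Option Int :=
  part1Go (PySem.Str.slice input_text none (some (-1))).toList 1 []

-- ===== PORT B =====
-- 'j = last_seen.get(c); if j is not None and j >= start: start = j + 1'
def bumpStart (start : Int) (j? : Option Int) : Int :=
  match j? with
  | some j => if start ≤ j then j + 1 else start
  | none => start

-- loop of B: for i, c in enumerate(stream): start = bump; last_seen[c] = i;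
-- if i - start + 1 == 4: return i + 1
def part1AltGo : List Char → Int → Int → PySem.Dict Char Int → Option Int
  | [], _, _, _ => none
  | c :: rest, i, start, seen =>
    let start' := bumpStart start (seen.get? c)
    let seen' := seen.insert c i
    if i - start' + 1 = 4 then some (i + 1)
    else part1AltGo rest (i + 1) start' seen'

def part1_alt (input_text : String) : Option Int :=
  part1AltGo (PySem.Str.slice input_text none (some (-1))).toList 0 0 PySem.Dict.empty

-- ===== PRECONDITION & SPEC =====
def Spec_part1 (input_text : String) (out : Option Int) : Prop := out = part1_alt input_text
instance (input_text : String) (out : Option Int) : Decidable (Spec_part1 input_text out) := by unfold Spec_part1; infer_instance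

-- ===== CLAIM (what is proved, stated in full; the proofs are below) =====
def Claim_equal_part1 : Prop := ∀ (input_text : String), Dom_part1 input_text → Spec_part1 input_text (part1 input_text)

-- ===== LEMMAS AND PROOFS =====

-- invariant tying B's loop state (start, seen) to the processed prefix h:
-- start is the left edge of the longest duplicate-free suffix of h (≤ 3 long so far),
-- and seen maps each character to the index of its last occurrence in h
def InvP1 (h : List Char) (start : Int) (seen : PySem.Dict Char Int) : Prop :=
  0 ≤ start ∧ start ≤ (h.length : Int) ∧
  (h.drop start.toNat).Nodup ∧
  (∀ s : Nat, (h.drop s).Nodup → start ≤ (s : Int)) ∧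
  (h.length : Int) - start ≤ 3 ∧
  (∀ ch j, seen.get? ch = some j ↔
      ∃ jn : Nat, j = (jn : Int) ∧ jn < h.length ∧ h[jn]? = some ch ∧ ch ∉ h.drop (jn + 1)) ∧
  (∀ ch, seen.get? ch = none → ch ∉ h)

lemma drop_sub_drop (h : List Char) (a b : Nat) (hab : a ≤ b) : List.Sublist (h.drop b) (h.drop a) := by
  have hb : h.drop b = (h.drop a).drop (b - a) := by
    rw [List.drop_drop]
    congr 1
    omega
  rw [hb]
  exact List.drop_sublist _ _

lemma mem_drop_of_getElem? (h : List Char) (c : Char) (jn s : Nat) (hs : s ≤ jn)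
    (hg : h[jn]? = some c) : c ∈ h.drop s := by
  have hg2 : (h.drop s)[jn - s]? = some c := by
    rw [List.getElem?_drop]
    rwa [show s + (jn - s) = jn by omega]
  exact List.mem_of_getElem? hg2

lemma le_of_not_mem_drop (h : List Char) (c : Char) (jn s : Nat)
    (hnot : c ∉ h.drop (jn + 1)) (hmem : c ∈ h.drop s) : s ≤ jn := by
  by_contra hlt
  exact hnot ((drop_sub_drop h (jn + 1) s (by omega)).subset hmem)

lemma nodup_of_card (l : List Char) (h : l.toFinset.card = l.length) : l.Nodup := by
  induction l with
  | nil => simp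
  | cons a t ih =>
    by_cases ha : a ∈ t
    · exfalso
      have h1 : (a :: t).toFinset = t.toFinset := by
        simp [List.toFinset_cons, Finset.insert_eq_self.mpr (List.mem_toFinset.mpr ha)]
      have h2 : t.toFinset.card ≤ t.length := List.toFinset_card_le t
      rw [h1] at h
      simp at h
      omega
    · have h1 : (a :: t).toFinset.card = t.toFinset.card + 1 := by
        rw [List.toFinset_cons]
        exact Finset.card_insert_of_notMem (by simpa using ha)
    -- equality forces t to be duplicate-free as well
      rw [h1] at h
      simp at h
      exact List.nodup_cons.mpr ⟨ha, ih (by omega)⟩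

-- len(set(d)) == 4  ⟺  d has 4 elements, all distinct (for d of length ≤ 4)
lemma setLen_eq_four (d : List Char) (hle : d.length ≤ 4) :
    (PySem.Set.ofList d).length = 4 ↔ d.Nodup ∧ d.length = 4 := by
  constructor
  · intro h
    have hsub : (PySem.Set.ofList d).toFinset = d.toFinset := by
      ext x
      simp [PySem.Set.mem_ofList]
    have hn : (PySem.Set.ofList d).Nodup := PySem.Set.nodup_ofList d
    have hle2 : (PySem.Set.ofList d).length ≤ d.length := PySem.Set.length_ofList_le d
    have hcard : d.toFinset.card = d.length := by
      rw [← hsub, List.toFinset_card_of_nodup hn]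
      omega
    exact ⟨nodup_of_card d hcard, by omega⟩
  · rintro ⟨hn, h4⟩
    rw [PySem.Set.ofList_eq_self_of_nodup d hn]
    exact h4

-- the deque update step, as a drop of the extended prefix
lemma deque_step (h : List Char) (c : Char) :
    (if 4 < (h.drop (h.length - 4) ++ [c]).length then (h.drop (h.length - 4) ++ [c]).tail
     else h.drop (h.length - 4) ++ [c]) = (h ++ [c]).drop (h.length + 1 - 4) := by
  by_cases hle : h.length ≤ 3
  · have h0 : h.length - 4 = 0 := by omega
    have h1 : h.length + 1 - 4 = 0 := by omega
    have hnot : ¬ 4 < (h.drop 0 ++ [c]).length := by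
      simp
      omega
    rw [h0, h1, if_neg hnot]
    simp
  · have hlt : 3 < h.length := by omega
    have hlen : (h.drop (h.length - 4)).length = 4 := by
      simp
      omega
    have h4 : 4 < (h.drop (h.length - 4) ++ [c]).length := by
      simp [hlen]
    rw [if_pos h4, ← List.drop_one,
      List.drop_append_of_le_length (by omega), List.drop_drop,
      List.drop_append_of_le_length (by omega : h.length + 1 - 4 ≤ h.length)]
    congr 2
    omega

-- properties of B's advanced left pointer
lemma bump_facts (h : List Char) (start : Int) (seen : PySem.Dict Char Int) (c : Char)
    (h0 : 0 ≤ start) (hsle : start ≤ (h.length : Int))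
    (hnd : (h.drop start.toNat).Nodup)
    (hmin : ∀ s : Nat, (h.drop s).Nodup → start ≤ (s : Int))
    (hsome : ∀ ch j, seen.get? ch = some j ↔
      ∃ jn : Nat, j = (jn : Int) ∧ jn < h.length ∧ h[jn]? = some ch ∧ ch ∉ h.drop (jn + 1))
    (hnone : ∀ ch, seen.get? ch = none → ch ∉ h) :
    start ≤ bumpStart start (seen.get? c) ∧ 0 ≤ bumpStart start (seen.get? c) ∧
    bumpStart start (seen.get? c) ≤ (h.length : Int) ∧
    ((h ++ [c]).drop (bumpStart start (seen.get? c)).toNat).Nodup ∧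
    (∀ s : Nat, ((h ++ [c]).drop s).Nodup → bumpStart start (seen.get? c) ≤ (s : Int)) := by
  -- the last occurrence of c in h lies strictly below the new pointer
  have hlast : ∀ jn : Nat, h[jn]? = some c → c ∉ h.drop (jn + 1) →
      (jn : Int) < bumpStart start (seen.get? c) := by
    intro jn hg hnotin
    have : seen.get? c = some (jn : Int) := by
      rw [hsome]
      refine ⟨jn, rfl, ?_, hg, hnotin⟩
      have := List.getElem?_eq_some_iff.mp hg
      exact this.1
    rw [this, bumpStart]
    split_ifs with hj
    · omega
    · omega
  -- basic bounds
  have hge : start ≤ bumpStart start (seen.get? c) := by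
    rcases seen.get? c with _ | j
    · simp [bumpStart]
    · simp only [bumpStart]
      split_ifs with hj <;> omega
  have hle : bumpStart start (seen.get? c) ≤ (h.length : Int) := by
    rcases hget : seen.get? c with _ | j
    · simpa [bumpStart] using hsle
    · obtain ⟨jn, hj1, hj2, _, _⟩ := (hsome c j).mp hget
      simp only [bumpStart]
      split_ifs with hj <;> omega
  have h0' : 0 ≤ bumpStart start (seen.get? c) := le_trans h0 hge
  -- the new pointer is past every occurrence of c
  have hcnot : c ∉ h.drop (bumpStart start (seen.get? c)).toNat := by
    intro hmem
    have hch : c ∈ h := List.mem_of_mem_drop hmem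
    rcases hget : seen.get? c with _ | j
    · exact hnone c hget hch
    · obtain ⟨jn, hj1, hj2, hj3, hj4⟩ := (hsome c j).mp hget
      have hs_le : (bumpStart start (seen.get? c)).toNat ≤ jn :=
        le_of_not_mem_drop h c jn _ hj4 hmem
      have hlt := hlast jn hj3 hj4
      omega
  -- duplicate-freeness of the new window
  have hnd' : ((h ++ [c]).drop (bumpStart start (seen.get? c)).toNat).Nodup := by
    rw [List.drop_append_of_le_length (by omega)]
    have hsubnd : (h.drop (bumpStart start (seen.get? c)).toNat).Nodup :=
      (drop_sub_drop h start.toNat _ (by omega)).nodup hnd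
    rw [List.nodup_append]
    refine ⟨hsubnd, by simp, ?_⟩
    intro x hx b hb
    have hbc : b = c := by simpa using hb
    subst hbc
    intro hxb
    exact hcnot (hxb ▸ hx)
  -- minimality of the new window
  have hmin' : ∀ s : Nat, ((h ++ [c]).drop s).Nodup → bumpStart start (seen.get? c) ≤ (s : Int) := by
    intro s hnods
    by_cases hs : s ≤ h.length
    · rw [List.drop_append_of_le_length hs, List.nodup_append] at hnods
      obtain ⟨hnodh, _, hdisj⟩ := hnods
      have hstart_s : start ≤ (s : Int) := hmin s hnodh
      have hcnots : c ∉ h.drop s := by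
        intro hmem
        exact hdisj c hmem c (by simp) rfl
      rcases hget : seen.get? c with _ | j
      · simpa [bumpStart] using hstart_s
      · obtain ⟨jn, hj1, hj2, hj3, hj4⟩ := (hsome c j).mp hget
        have hjn_lt : jn < s := by
          by_contra hc2
          exact hcnots (mem_drop_of_getElem? h c jn s (by omega) hj3)
        simp only [bumpStart]
        split_ifs with hj <;> omega
    · omega
  exact ⟨hge, h0', hle, hnd', hmin'⟩

-- the inserted dict still records exactly the last occurrences
lemma seen_step (h : List Char) (seen : PySem.Dict Char Int) (c : Char)
    (hsome : ∀ ch j, seen.get? ch = some j ↔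
      ∃ jn : Nat, j = (jn : Int) ∧ jn < h.length ∧ h[jn]? = some ch ∧ ch ∉ h.drop (jn + 1))
    (hnone : ∀ ch, seen.get? ch = none → ch ∉ h) :
    (∀ ch j, (seen.insert c (h.length : Int)).get? ch = some j ↔
      ∃ jn : Nat, j = (jn : Int) ∧ jn < (h ++ [c]).length ∧ (h ++ [c])[jn]? = some ch ∧
        ch ∉ (h ++ [c]).drop (jn + 1)) ∧
    (∀ ch, (seen.insert c (h.length : Int)).get? ch = none → ch ∉ h ++ [c]) := by
  constructor
  · intro ch j
    rw [PySem.Dict.get?_insert]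
    by_cases hch : ch = c
    · rw [if_pos hch]
      constructor
      · intro h1
        simp only [Option.some.injEq] at h1
        refine ⟨h.length, h1.symm, by simp, ?_, ?_⟩
        · rw [List.getElem?_append_right (le_refl _)]
          simp [hch]
        · have hdropnil : (h ++ [c]).drop (h.length + 1) = [] := by
            apply List.drop_eq_nil_of_le
            simp
          simp [hdropnil]
      · rintro ⟨jn, hj1, hj2, hj3, hj4⟩
        have hjn : jn = h.length := by
          by_contra hne
          have hjn_lt : jn < h.length := by simp at hj2; omega
          apply hj4
          rw [List.drop_append_of_le_length (by omega)]
          simp [hch]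
        subst hjn
        rw [hj1]

    · rw [if_neg hch, hsome]
      constructor
      · rintro ⟨jn, hj1, hj2, hj3, hj4⟩
        refine ⟨jn, hj1, by simp; omega, ?_, ?_⟩
        · rwa [List.getElem?_append_left hj2]
        · rw [List.drop_append_of_le_length (by omega)]
          simp only [List.mem_append, List.mem_singleton]
          rintro (hmem | hmem)
          · exact hj4 hmem
          · exact hch hmem
      · rintro ⟨jn, hj1, hj2, hj3, hj4⟩
        have hjn_lt : jn < h.length := by
          by_contra hc2
          have hjn : jn = h.length := by simp at hj2; omega
          subst hjn
          rw [List.getElem?_append_right (le_refl _)] at hj3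
          simp at hj3
          exact hch hj3.symm
        refine ⟨jn, hj1, hjn_lt, ?_, ?_⟩
        · rwa [List.getElem?_append_left hjn_lt] at hj3
        · intro hmem
          apply hj4
          rw [List.drop_append_of_le_length (by omega)]
          simp [hmem]
  · intro ch hget
    rw [PySem.Dict.get?_insert] at hget
    by_cases hch : ch = c
    · rw [if_pos hch] at hget
      cases hget
    · rw [if_neg hch] at hget
      have := hnone ch hget
      simp only [List.mem_append, List.mem_singleton]
      rintro (hmem | hmem)
      · exact this hmem
      · exact hch hmem

-- A's "last 4 all distinct" test coincides with B's "window reached length 4" test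
lemma check_iff (h : List Char) (start S : Int) (c : Char)
    (h0 : 0 ≤ start) (hwin : (h.length : Int) - start ≤ 3)
    (hge : start ≤ S) (hle : S ≤ (h.length : Int))
    (hnd' : ((h ++ [c]).drop S.toNat).Nodup)
    (hmin' : ∀ s : Nat, ((h ++ [c]).drop s).Nodup → S ≤ (s : Int)) :
    (PySem.Set.ofList ((h ++ [c]).drop (h.length + 1 - 4))).length = 4 ↔
      (h.length : Int) - S + 1 = 4 := by
  have hlen : ((h ++ [c]).drop (h.length + 1 - 4)).length ≤ 4 := by
    simp
    omega
  rw [setLen_eq_four _ hlen]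
  constructor
  · rintro ⟨hnods, hlen4⟩
    have hm3 : 3 ≤ h.length := by
      simp at hlen4
      omega
    have hS_le : S ≤ ((h.length + 1 - 4 : Nat) : Int) := hmin' _ hnods
    omega
  · intro hS
    have hm3 : 3 ≤ h.length := by omega
    have hSt : S.toNat = h.length + 1 - 4 := by omega
    rw [← hSt]
    refine ⟨hnd', ?_⟩
    simp
    omega

lemma inv_nil : InvP1 [] 0 PySem.Dict.empty := by
  refine ⟨le_refl 0, by simp, by simp, ?_, by simp, ?_, ?_⟩
  · intro s _
    exact_mod_cast Nat.zero_le s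
  · intro ch j
    simp [PySem.Dict.get?_empty]
  · intro ch _
    simp

-- core lemma: both loops, run from matching states, return the same result
lemma go_eq (l : List Char) : ∀ (h : List Char) (start : Int) (seen : PySem.Dict Char Int),
    InvP1 h start seen →
    part1Go l ((h.length : Int) + 1) (h.drop (h.length - 4)) =
      part1AltGo l (h.length : Int) start seen := by
  induction l with
  | nil => intro h start seen _; rfl
  | cons c rest ih =>
    intro h start seen hInv
    obtain ⟨h0, hsle, hnd, hmin, hwin, hsome, hnone⟩ := hInv
    obtain ⟨hge, h0', hle, hnd', hmin'⟩ := bump_facts h start seen c h0 hsle hnd hmin hsome hnone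
    obtain ⟨hsome', hnone'⟩ := seen_step h seen c hsome hnone
    have hA : part1Go (c :: rest) ((h.length : Int) + 1) (h.drop (h.length - 4)) =
        (if (PySem.Set.ofList (if 4 < (h.drop (h.length - 4) ++ [c]).length
              then (h.drop (h.length - 4) ++ [c]).tail else h.drop (h.length - 4) ++ [c])).length = 4
         then some ((h.length : Int) + 1)
         else part1Go rest ((h.length : Int) + 1 + 1)
           (if 4 < (h.drop (h.length - 4) ++ [c]).length
            then (h.drop (h.length - 4) ++ [c]).tail else h.drop (h.length - 4) ++ [c])) := rfl
    have hB : part1AltGo (c :: rest) ((h.length : Int)) start seen =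
        (if (h.length : Int) - bumpStart start (seen.get? c) + 1 = 4
         then some ((h.length : Int) + 1)
         else part1AltGo rest ((h.length : Int) + 1) (bumpStart start (seen.get? c))
           (seen.insert c (h.length : Int))) := rfl
    rw [hA, deque_step h c, hB]
    have hiff := check_iff h start (bumpStart start (seen.get? c)) c h0 hwin hge hle hnd' hmin'
    by_cases hc4 : (h.length : Int) - bumpStart start (seen.get? c) + 1 = 4
    · rw [if_pos (hiff.mpr hc4), if_pos hc4]
    · rw [if_neg (fun hh => hc4 (hiff.mp hh)), if_neg hc4]
      have hinv' : InvP1 (h ++ [c]) (bumpStart start (seen.get? c)) (seen.insert c (h.length : Int)) := by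
        refine ⟨h0', by simp; omega, hnd', hmin', by simp; omega, hsome', hnone'⟩
      have := ih (h ++ [c]) (bumpStart start (seen.get? c)) (seen.insert c (h.length : Int)) hinv'
      simp only [List.length_append, List.length_singleton] at this
      push_cast at this
      convert this using 2

-- ===== VERDICT (by name: the statement is the Claim_ definition above) =====
theorem part1_spec : Claim_equal_part1 := by
  intro input_text _
  unfold Spec_part1 part1 part1_alt
  have := go_eq (PySem.Str.slice input_text none (some (-1))).toList [] 0 PySem.Dict.empty inv_nil
  simpa using this
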